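-- pv_equiv track=rewrite | github.com/linero-tech/python-hw-Hannamm | src/lms130/task9.py | task9
-- ===== SOURCE A (Python) =====
-- def task9(items):
--     result = []
--
--     if items:
--         result.append(items[0] ** 2)  # multiply the first element by itself
--         for i in range(1, len(items)):
--             result.append(items[i] * items[i - 1])  # multiply each element by the previous element
--     else:
--         result = []
--
--     return result
-- ===== SOURCE B (Python) =====
-- def task9(items):
--     # Build the result back-to-front: walk the list in reverse carrying the
--     # element that follows, append each product, finish with the squared head,
--     # then reverse the output once.
--     out = []
--     it = reversed(items)
--     cur = next(it, None)
--     if cur is None: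
--         return []
--     for prev in it:
--         out.append(cur * prev)
--         cur = prev
--     out.append(cur ** 2)
--     out.reverse()
--     return out
-- ===== Notes on version B (the rewrite author's own statement) =====
-- stated objective: alternative
-- what changed: Instead of an index loop over range(1, len(items)) building the result front-to-back, B traverses the list back-to-front via a reversed iterator carrying the following element, appends the squared head last, and reverses the output once; no indexing at all.
import Mathlib
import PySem

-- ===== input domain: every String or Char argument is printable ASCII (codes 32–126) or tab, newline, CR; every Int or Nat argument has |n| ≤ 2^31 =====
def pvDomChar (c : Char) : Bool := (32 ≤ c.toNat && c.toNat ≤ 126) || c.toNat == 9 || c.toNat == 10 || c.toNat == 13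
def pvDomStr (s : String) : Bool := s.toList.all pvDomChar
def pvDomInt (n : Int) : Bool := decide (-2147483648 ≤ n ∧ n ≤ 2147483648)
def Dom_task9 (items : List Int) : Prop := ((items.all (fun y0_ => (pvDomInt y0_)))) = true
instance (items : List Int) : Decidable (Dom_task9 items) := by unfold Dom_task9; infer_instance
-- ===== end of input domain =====

-- B builds the result back-to-front over the reversed list (no indexing) and reverses once (alternative decomposition; return value only).

-- ===== PORT A =====
def task9 (items : List Int) : List Int :=
  if items = [] then []
  else
    (PySem.List.pyRange 1 (items.length : Int) 1).foldl
      (fun acc i => acc ++ [PySem.List.pyGetD items i 0 * PySem.List.pyGetD items (i - 1) 0])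
      [(PySem.List.pyGetD items 0 0) ^ 2]

-- ===== PORT B =====
def task9_alt (items : List Int) : List Int :=
  match items.reverse with
  | [] => []
  | cur :: rest =>
    -- for prev in it: out.append(cur * prev); cur = prev   (state = (cur, out))
    let s := rest.foldl (fun (s : Int × List Int) prev => (prev, s.2 ++ [s.1 * prev])) (cur, [])
    (s.2 ++ [s.1 ^ 2]).reverse

-- ===== PRECONDITION & SPEC =====
def Spec_task9 (items : List Int) (out : List Int) : Prop := out = task9_alt items
instance (items : List Int) (out : List Int) : Decidable (Spec_task9 items out) := by unfold Spec_task9; infer_instance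

-- ===== CLAIM (what is proved, stated in full; the proofs are below) =====
def Claim_equal_task9 : Prop := ∀ (items : List Int), Dom_task9 items → Spec_task9 items (task9 items)

-- ===== LEMMAS AND PROOFS =====

-- the backward loop of B: carries the running element, emits adjacent products
lemma revloop_eq (l : List Int) (c : Int) (acc : List Int) :
    l.foldl (fun (s : Int × List Int) prev => (prev, s.2 ++ [s.1 * prev])) (c, acc)
    = (l.getLastD c, acc ++ List.zipWith (fun a b => a * b) (c :: l) l) := by
  induction l generalizing c acc with
  | nil => simp
  | cons p ps ih =>
    rw [List.foldl_cons]
    simp only [ih, List.getLastD_cons, List.zipWith_cons_cons]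
    simp

-- reversing B's backward products gives the forward adjacent products
lemma zipWith_reverse_tail (l : List Int) :
    (List.zipWith (fun a b => a * b) l.reverse l.reverse.tail).reverse
    = List.zipWith (fun prev cur => cur * prev) l l.tail := by
  apply List.ext_getElem
  · cases l <;> simp [List.length_tail]
  · intro k h1 h2
    have hl : l.length ≠ 0 := by
      intro h; rw [List.length_reverse] at h1; simp [h] at h1
    have hk : k + 1 < l.length := by
      rcases l with _ | ⟨x, xs⟩
      · simp at hl
      · simpa using h2
    have hlen : (List.zipWith (fun a b : Int => a * b) l.reverse l.reverse.tail).length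
        = l.length - 1 := by
      cases l <;> simp [List.length_tail]
    have hk2 : k < l.length - 1 := by
      simpa [hlen] using h1
    rw [List.getElem_reverse, List.getElem_zipWith, List.getElem_zipWith,
        List.getElem_tail, List.getElem_tail, List.getElem_reverse, List.getElem_reverse]
    simp only [hlen]
    have e1 : l.length - 1 - (l.length - 1 - 1 - k) = k + 1 := by omega
    have e2 : l.length - 1 - (l.length - 1 - 1 - k + 1) = k := by omega
    simp only [e1, e2]

-- A's appended products, as a zipWith over adjacent pairs
lemma task9_map_eq_zipWith (x : Int) (xs : List Int) :
    (PySem.List.pyRange 1 ((x :: xs).length : Int) 1).map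
      (fun i => PySem.List.pyGetD (x :: xs) i 0 * PySem.List.pyGetD (x :: xs) (i - 1) 0)
    = List.zipWith (fun prev cur => cur * prev) (x :: xs) xs := by
  apply List.ext_getElem
  · simp [PySem.List.length_pyRange_one]
  · intro k h1 h2
    have hk : k < xs.length := by
      simpa [PySem.List.length_pyRange_one] using h1
    rw [List.getElem_map, List.getElem_zipWith, PySem.List.getElem_pyRange_one]
    have e1 : (1 : Int) + (k : Int) = ((k + 1 : Nat) : Int) := by push_cast; ring
    have e2 : ((k + 1 : Nat) : Int) - 1 = ((k : Nat) : Int) := by push_cast; ring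
    rw [e1, e2, PySem.List.pyGetD_natCast, PySem.List.pyGetD_natCast]
    rw [List.getD_eq_getElem _ _ (by simpa using hk), List.getD_eq_getElem _ _ (by simp; omega)]
    simp

lemma task9_alt_eq (x : Int) (xs : List Int) :
    task9_alt (x :: xs) = x ^ 2 :: List.zipWith (fun prev cur => cur * prev) (x :: xs) xs := by
  unfold task9_alt
  have hne : (x :: xs).reverse ≠ [] := by simp
  rcases hrev : (x :: xs).reverse with _ | ⟨c, rest⟩
  · exact absurd hrev hne
  · simp only [revloop_eq]
    have h1 : (c :: rest).getLast? = some x := by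
      rw [← hrev, List.getLast?_reverse]; rfl
    have hlast : rest.getLast?.getD c = x := by
      cases hres : rest.getLast? with
      | none =>
        have hnil : rest = [] := List.getLast?_eq_none_iff.mp hres
        subst hnil
        simpa using h1
      | some a =>
        have h2 : a ∈ (c :: rest).getLast? := List.mem_getLast?_cons (by simp [hres])
        rw [h1] at h2
        simpa using h2.symm
    have hzip : (List.zipWith (fun a b => a * b) (c :: rest) rest).reverse
        = List.zipWith (fun prev cur => cur * prev) (x :: xs) xs := by
      have := zipWith_reverse_tail (x :: xs)
      rw [hrev] at this
      simpa using this
    simp [hlast, ← hzip]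

-- ===== VERDICT =====
theorem task9_spec : Claim_equal_task9 := by
  intro items _
  unfold Spec_task9 task9
  cases items with
  | nil => simp [task9_alt]
  | cons x xs =>
    simp only [reduceCtorEq, if_false]
    rw [PySem.List.foldl_append_singleton_eq_map, task9_map_eq_zipWith, task9_alt_eq]
    have h0 : PySem.List.pyGetD (x :: xs) 0 0 = x := PySem.List.pyGetD_zero_cons _ _ _
    simp [h0]
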